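-- pv_equiv track=rewrite | github.com/Angel3245/PoS-Tagging | src/preprocess.py | generate_label_dict
-- ===== SOURCE A (Python) =====
-- def generate_label_dict(samples):
--     # Create an empty dictionary to store the unique strings and their labels
--     toret = {}
--
--     # Add an UNKNOWN token
--     toret["[UNK]"] = 0
--
--     # Counter for labeling
--     label_counter = 1
--
--     # Iterate through the list
--     for sentence in samples:
--         for item in sentence:
--             if item not in toret:
--                 # If the string is not in the dictionary, add it with a label
--                 toret[item] = label_counter
--                 label_counter += 1
--
--     return toret
-- ===== SOURCE B (Python) =====
-- def generate_label_dict(samples):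
--     # Flatten, then compute each token's first-occurrence index by a single
--     # reverse scan with overwrite (the earliest index written last wins).
--     flat = [tok for sentence in samples for tok in sentence]
--     first = {}
--     for i, tok in reversed(list(enumerate(flat))):
--         first[tok] = i
--     # Order tokens by their first-occurrence index and hand out ids,
--     # keeping the reserved id 0 for "[UNK]".
--     toret = {"[UNK]": 0}
--     label = 1
--     for tok in sorted(first, key=lambda t: first.get(t, 0)):
--         if tok != "[UNK]":
--             toret[tok] = label
--             label += 1
--     return toret
-- ===== Notes on version B (the rewrite author's own statement) =====
-- stated objective: alternative
-- what changed: Instead of A's single forward loop with an interleaved membership test, B computes each token's first-occurrence index by one reverse scan that overwrites a dict entry per occurrence, then sorts the distinct tokens by that index and assigns incremental ids, keeping the reserved id 0 for "[UNK]".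
import Mathlib
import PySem

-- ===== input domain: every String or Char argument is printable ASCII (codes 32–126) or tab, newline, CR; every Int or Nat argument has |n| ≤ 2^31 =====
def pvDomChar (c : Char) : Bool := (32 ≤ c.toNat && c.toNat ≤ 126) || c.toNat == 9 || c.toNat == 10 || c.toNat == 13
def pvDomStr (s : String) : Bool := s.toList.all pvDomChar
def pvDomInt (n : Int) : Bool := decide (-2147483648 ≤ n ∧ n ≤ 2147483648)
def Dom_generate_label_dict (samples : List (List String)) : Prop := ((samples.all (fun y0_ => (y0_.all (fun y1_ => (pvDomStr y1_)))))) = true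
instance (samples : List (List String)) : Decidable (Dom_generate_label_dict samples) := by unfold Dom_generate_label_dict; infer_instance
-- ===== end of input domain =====

-- B replaces A's interleaved membership-and-insert loop with a different algorithm:
-- a reverse scan records each token's first-occurrence index by dict overwrite,
-- the tokens are then SORTED by that index and labeled, "[UNK]" keeping id 0.

-- ===== PORT A =====
def generate_label_dict (samples : List (List String)) : List (String × Int) :=
  -- toret = {}; toret["[UNK]"] = 0; label_counter = 1
  let init : PySem.Dict String Int := (PySem.Dict.empty).insert "[UNK]" 0
  -- nested for-loops, inserting items not yet in the dict
  let st := samples.foldl (fun st sentence =>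
    sentence.foldl (fun st item =>
      if st.1.contains item = false then (st.1.insert item st.2, st.2 + 1) else st) st)
    (init, 1)
  st.1.items

-- ===== PORT B =====
def generate_label_dict_alt (samples : List (List String)) : List (String × Int) :=
  -- flat = [tok for sentence in samples for tok in sentence]
  let flat : List String := samples.flatMap (fun sentence => sentence)
  -- first = {}; for i, tok in reversed(list(enumerate(flat))): first[tok] = i
  let first : PySem.Dict String Int :=
    ((PySem.List.enumerate flat 0).reverse).foldl (fun d p => d.insert p.2 p.1)
      PySem.Dict.empty
  -- for tok in sorted(first, key=lambda t: first.get(t, 0)): …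
  let ordered := PySem.List.sorted first.keys (fun t => first.getD t 0) false
  -- toret = {"[UNK]": 0}; label = 1; skip "[UNK]", insert the rest with fresh ids
  let st := ordered.foldl (fun st tok =>
    if tok ≠ "[UNK]" then (st.1.insert tok st.2, st.2 + 1) else st)
    (((PySem.Dict.empty).insert "[UNK]" 0 : PySem.Dict String Int), 1)
  st.1.items

-- ===== PRECONDITION & SPEC =====
def Spec_generate_label_dict (samples : List (List String)) (out : List (String × Int)) : Prop := out = generate_label_dict_alt samples
instance (samples : List (List String)) (out : List (String × Int)) : Decidable (Spec_generate_label_dict samples out) := by unfold Spec_generate_label_dict; infer_instance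

-- ===== CLAIM =====
def Claim_equal_generate_label_dict : Prop := ∀ (samples : List (List String)), Dom_generate_label_dict samples → Spec_generate_label_dict samples (generate_label_dict samples)

-- ===== LEMMAS AND PROOFS =====

-- first-occurrence dedup relative to an already-seen list (proof-only helper)
def pvDed (seen : List String) : List String → List String
  | [] => []
  | t :: ts => if t ∈ seen then pvDed seen ts else t :: pvDed (t :: seen) ts

-- the common "always insert with the next id" step both folds reduce to
def pvIns (st : PySem.Dict String Int × Int) (tok : String) : PySem.Dict String Int × Int :=
  (st.1.insert tok st.2, st.2 + 1)

theorem pvDed_congr (l : List String) : ∀ (s₁ s₂ : List String),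
    (∀ x, x ∈ s₁ ↔ x ∈ s₂) → pvDed s₁ l = pvDed s₂ l := by
  induction l with
  | nil => intro _ _ _; rfl
  | cons t ts ih =>
    intro s₁ s₂ h
    by_cases ht : t ∈ s₁
    · simp [pvDed, ht, (h t).mp ht, ih s₁ s₂ h]
    · have ht₂ : t ∉ s₂ := fun hc => ht ((h t).mpr hc)
      simp only [pvDed, if_neg ht, if_neg ht₂]
      exact congrArg _ (ih _ _ (by intro x; simp [h x]))

theorem pvDed_not_mem (l : List String) : ∀ (s : List String) (x : String),
    x ∈ s → x ∉ pvDed s l := by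
  induction l with
  | nil => intro s x _; simp [pvDed]
  | cons t ts ih =>
    intro s x hx
    by_cases ht : t ∈ s
    · simpa [pvDed, ht] using ih s x hx
    · have hxt : x ≠ t := fun he => ht (he ▸ hx)
      simpa [pvDed, ht, hxt] using ih (t :: s) x (by simp [hx])

-- removing one fresh element from the seen list = filtering it out of the dedup
theorem pvDed_cons (l : List String) : ∀ (s : List String) (u : String), u ∉ s →
    pvDed (u :: s) l = (pvDed s l).filter (fun t => t ≠ u) := by
  induction l with
  | nil => intro _ _ _; rfl
  | cons t ts ih =>
    intro s u hu
    by_cases ht : t ∈ s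
    · simp [pvDed, ht, ih s u hu]
    · by_cases htu : t = u
      · subst htu
        have h1 : pvDed (t :: s) (t :: ts) = pvDed (t :: s) ts := by
          simp [pvDed]
        have h2 : pvDed s (t :: ts) = t :: pvDed (t :: s) ts := by
          simp [pvDed, ht]
        rw [h1, h2, List.filter_cons]
        simp only [ne_eq, not_true_eq_false, decide_false, Bool.false_eq_true, if_false]
        refine (List.filter_eq_self.mpr ?_).symm
        intro x hx
        have hne : x ≠ t := by
          intro he
          exact pvDed_not_mem ts (t :: s) t (by simp) (he ▸ hx)
        simpa using hne
      · have h1 : pvDed (u :: s) (t :: ts) = t :: pvDed (t :: u :: s) ts := by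
          simp [pvDed, ht, htu]
        have h2 : pvDed s (t :: ts) = t :: pvDed (t :: s) ts := by
          simp [pvDed, ht]
        rw [h1, h2, List.filter_cons]
        simp only [ne_eq, htu, not_false_eq_true, decide_true, if_true]
        have hcongr : pvDed (t :: u :: s) ts = pvDed (u :: t :: s) ts :=
          pvDed_congr ts _ _ (by intro x; simp; tauto)
        rw [hcongr, ih (t :: s) u (by simp [hu]; tauto)]

-- PySem.Set.ofList's fold, started from any seen list, appends exactly pvDed seen
theorem pvOfList_loop (l : List String) : ∀ (s : List String),
    l.foldl PySem.Set.add s = s ++ pvDed s l := by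
  induction l with
  | nil => intro s; simp [pvDed]
  | cons t ts ih =>
    intro s
    by_cases ht : t ∈ s
    · have hc : PySem.Set.contains s t = true := by
        simp [PySem.Set.contains, ht]
      simp [PySem.Set.add, List.foldl_cons, pvDed, ht, ih s]
    · have hc : ¬ PySem.Set.contains s t = true := by
        simp [PySem.Set.contains, ht]
      simp only [List.foldl_cons, PySem.Set.add, if_neg hc, pvDed, if_neg ht]
      rw [ih (s ++ [t])]
      have : pvDed (s ++ [t]) ts = pvDed (t :: s) ts :=
        pvDed_congr ts _ _ (by intro x; simp; tauto)
      simp [this]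

-- A's insert-if-new fold over any token stream = always-insert fold over pvDed of it
theorem pvA_fold (l : List String) : ∀ (d : PySem.Dict String Int) (c : Int),
    l.foldl (fun st item =>
        if st.1.contains item = false then (st.1.insert item st.2, st.2 + 1) else st) (d, c)
      = (pvDed d.keys l).foldl pvIns (d, c) := by
  induction l with
  | nil => intro d c; rfl
  | cons t ts ih =>
    intro d c
    by_cases h : d.contains t
    · have hk : t ∈ d.keys := (PySem.Dict.contains_iff_mem_keys d t).mp h
      simp [List.foldl_cons, h, pvDed, hk, ih d c]
    · have hc : d.contains t = false := by simpa using h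
      have hk : t ∉ d.keys := fun hm => h ((PySem.Dict.contains_iff_mem_keys d t).mpr hm)
      simp only [List.foldl_cons, hc, if_true, pvDed, if_neg hk]
      rw [ih (d.insert t c) (c + 1)]
      have hkeys : (d.insert t c).keys = d.keys ++ [t] :=
        PySem.Dict.keys_insert_of_not_contains d c hc
      have : pvDed (d.insert t c).keys ts = pvDed (t :: d.keys) ts := by
        rw [hkeys]
        exact pvDed_congr ts _ _ (by intro x; simp; tauto)
      simp [this, pvIns]

-- B's skip-"[UNK]" fold = always-insert fold over the filtered list
theorem pvB_fold (l : List String) : ∀ (st : PySem.Dict String Int × Int),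
    l.foldl (fun st tok =>
        if tok ≠ "[UNK]" then (st.1.insert tok st.2, st.2 + 1) else st) st
      = (l.filter (fun t => t ≠ "[UNK]")).foldl pvIns st := by
  induction l with
  | nil => intro st; rfl
  | cons t ts ih =>
    intro st
    by_cases h : t = "[UNK]"
    · have hp : decide (t ≠ "[UNK]") = false := by simp [h]
      rw [List.foldl_cons, if_neg (by simp [h]), List.filter_cons, hp]
      simpa using ih st
    · have hp : decide (t ≠ "[UNK]") = true := by simp [h]
      rw [List.foldl_cons, if_pos h, List.filter_cons, hp]
      simpa [pvIns] using ih (st.1.insert t st.2, st.2 + 1)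

-- the reverse-scan dict holds each token's FIRST-occurrence index (foldr form)
theorem pvFirst_getD (l : List String) : ∀ (s : Int) (d : PySem.Dict String Int) (t : String),
    ((PySem.List.enumerate l s).foldr (fun p acc => acc.insert p.2 p.1) d).getD t 0
      = if t ∈ l then s + (l.idxOf t : Int) else d.getD t 0 := by
  induction l with
  | nil => intro s d t; simp [PySem.List.enumerate_nil]
  | cons x xs ih =>
    intro s d t
    rw [PySem.List.enumerate_cons, List.foldr_cons]
    by_cases hxt : t = x
    · subst hxt
      simp [PySem.Dict.getD_insert_self, List.idxOf_cons_self]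
    · rw [PySem.Dict.getD_insert_of_ne _ _ _ hxt, ih (s + 1) d t]
      by_cases hm : t ∈ xs
      · have : List.idxOf t (x :: xs) = List.idxOf t xs + 1 := by
          simp [List.idxOf_cons, beq_false_of_ne (Ne.symm hxt)]
        simp only [hm, if_true, List.mem_cons, hxt, false_or, this]
        push_cast; ring
      · simp [hm, List.mem_cons, hxt]

-- PySem.Set.ofList lists the tokens in strictly increasing first-occurrence order
theorem pvOfList_pairwise (l : List String) :
    (PySem.Set.ofList l).Pairwise (fun a b => List.idxOf a l < List.idxOf b l) := by
  induction l using List.reverseRecOn with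
  | nil => simp [PySem.Set.ofList]
  | append_singleton l x ih =>
    have hofl : PySem.Set.ofList (l ++ [x]) = PySem.Set.add (PySem.Set.ofList l) x := by
      simp [PySem.Set.ofList_eq_foldl, List.foldl_append]
    by_cases hx : x ∈ l
    · have hmem : x ∈ PySem.Set.ofList l := (PySem.Set.mem_ofList _ _).mpr hx
      rw [hofl, PySem.Set.add_of_mem hmem]
      refine List.Pairwise.imp_of_mem ?_ ih
      intro a b ha hb hab
      have ha' : a ∈ l := (PySem.Set.mem_ofList _ _).mp ha
      have hb' : b ∈ l := (PySem.Set.mem_ofList _ _).mp hb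
      rwa [List.idxOf_append_of_mem ha', List.idxOf_append_of_mem hb']
    · have hmem : x ∉ PySem.Set.ofList l := fun h => hx ((PySem.Set.mem_ofList _ _).mp h)
      rw [hofl, PySem.Set.add_of_not_mem hmem, List.pairwise_append]
      refine ⟨?_, by simp, ?_⟩
      · refine List.Pairwise.imp_of_mem ?_ ih
        intro a b ha hb hab
        have ha' : a ∈ l := (PySem.Set.mem_ofList _ _).mp ha
        have hb' : b ∈ l := (PySem.Set.mem_ofList _ _).mp hb
        rwa [List.idxOf_append_of_mem ha', List.idxOf_append_of_mem hb']
      · intro a ha b hb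
        have ha' : a ∈ l := (PySem.Set.mem_ofList _ _).mp ha
        have hb' : b = x := by simpa using hb
        subst hb'
        rw [List.idxOf_append_of_mem ha', List.idxOf_append_of_notMem hx]
        have := List.idxOf_lt_length_of_mem ha'
        simp only [List.idxOf_cons_self]
        omega

theorem generate_label_dict_spec : Claim_equal_generate_label_dict := by
  intro samples _
  unfold Spec_generate_label_dict generate_label_dict generate_label_dict_alt
  simp only []
  set flat : List String := samples.flatMap (fun sentence => sentence) with hflatdef
  have hflat : flat = samples.flatten := by simp [hflatdef, List.flatMap_def]
  set first : PySem.Dict String Int :=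
    ((PySem.List.enumerate flat 0).reverse).foldl (fun d p => d.insert p.2 p.1)
      PySem.Dict.empty with hfirstdef
  -- getD of first = first-occurrence index, for tokens of flat
  have hgetD : ∀ t ∈ flat, first.getD t 0 = (List.idxOf t flat : Int) := by
    intro t ht
    have := pvFirst_getD flat 0 PySem.Dict.empty t
    rw [List.foldl_reverse] at hfirstdef
    rw [hfirstdef, this, if_pos ht, zero_add]
  -- keys of first: nodup, same membership as flat
  have hkeys_eq : first.keys =
      PySem.Set.update (PySem.Dict.empty : PySem.Dict String Int).keys
        (((PySem.List.enumerate flat 0).reverse).map (fun p => p.2)) := by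
    rw [hfirstdef]
    exact PySem.Dict.keys_foldl_insert_key (κ := String) (ν := Int) (β := Int × String)
      ((PySem.List.enumerate flat 0).reverse) (fun p => p.2) (fun d p => p.1) PySem.Dict.empty
  have hkeys_mem : ∀ t, t ∈ first.keys ↔ t ∈ flat := by
    intro t
    rw [hkeys_eq, PySem.Set.mem_update]
    constructor
    · rintro (h | h)
      · simp [PySem.Dict.keys_empty] at h
      · rcases List.mem_map.mp h with ⟨p, hp, rfl⟩
        have := PySem.List.map_snd_enumerate flat 0
        have hp' : p ∈ PySem.List.enumerate flat 0 := List.mem_reverse.mp hp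
        rw [← this]
        exact List.mem_map_of_mem hp'
    · intro h
      right
      have : (((PySem.List.enumerate flat 0).reverse).map (fun p => p.2))
          = ((PySem.List.enumerate flat 0).map (fun p => p.2)).reverse := by
        simp
      rw [this, List.mem_reverse, PySem.List.map_snd_enumerate]
      exact h
  have hkeys_nodup : first.keys.Nodup := by
    rw [hfirstdef]
    exact PySem.Dict.nodup_keys_foldl_insert_key (κ := String) (ν := Int) (β := Int × String)
      ((PySem.List.enumerate flat 0).reverse) (fun p => p.2) (fun d p => p.1) PySem.Dict.empty
      (by simp [PySem.Dict.keys_empty])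
  -- the sorted key list IS the first-occurrence dedup of flat
  have hsorted : PySem.List.sorted first.keys (fun t => first.getD t 0) false
      = PySem.Set.ofList flat := by
    apply PySem.List.sorted_eq_of_perm_of_pairwise_lt
    · refine (List.perm_ext_iff_of_nodup (PySem.Set.nodup_ofList flat) hkeys_nodup).mpr ?_
      intro t
      rw [PySem.Set.mem_ofList, hkeys_mem]
    · refine List.Pairwise.imp_of_mem ?_ (pvOfList_pairwise flat)
      intro a b ha hb hab
      have ha' : a ∈ flat := (PySem.Set.mem_ofList _ _).mp ha
      have hb' : b ∈ flat := (PySem.Set.mem_ofList _ _).mp hb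
      rw [hgetD a ha', hgetD b hb']
      exact_mod_cast hab
  rw [hsorted, pvB_fold]
  have hnested : samples.foldl (fun st sentence =>
      sentence.foldl (fun st item =>
        if st.1.contains item = false then (st.1.insert item st.2, st.2 + 1) else st) st)
      (((PySem.Dict.empty).insert "[UNK]" 0 : PySem.Dict String Int), 1)
      = samples.flatten.foldl (fun st item =>
        if st.1.contains item = false then (st.1.insert item st.2, st.2 + 1) else st)
      (((PySem.Dict.empty).insert "[UNK]" 0 : PySem.Dict String Int), 1) :=
    (List.foldl_flatten).symm
  rw [hnested, pvA_fold]
  have hkeysU : ((PySem.Dict.empty).insert "[UNK]" 0 : PySem.Dict String Int).keys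
      = ["[UNK]"] := by decide
  rw [hkeysU]
  have hof : PySem.Set.ofList flat = pvDed [] flat := by
    show flat.foldl PySem.Set.add PySem.Set.empty = _
    simpa [PySem.Set.empty] using pvOfList_loop flat ([] : List String)
  rw [hof, ← hflat]
  have : pvDed ["[UNK]"] flat = (pvDed [] flat).filter (fun t => t ≠ "[UNK]") :=
    pvDed_cons flat [] "[UNK]" (by simp)
  rw [this]
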